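-- pv_equiv track=rewrite | github.com/giruda-gear/algorithms-and-patterns | solutions/trade_comic_books_for_novel_books.py | trade_comic_books_for_novel_books
-- ===== SOURCE A (Python) =====
-- def trade_comic_books_for_novel_books(
--     comic_books, coins, coins_needed, coins_offered
-- ) -> int:
--     # needed_coins = coins_needed * comic_books
--     # if coins >= needed_coins:
--     #     return comic_books
--
--     while comic_books > 0:
--         needed_coins = coins_needed * comic_books
--
--         if coins >= needed_coins:
--             return comic_books
--         else:
--             comic_books -= 1
--             coins += coins_offered
--
--     return comic_books
-- ===== SOURCE B (Python) =====
-- def trade_comic_books_for_novel_books(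
--     comic_books, coins, coins_needed, coins_offered
-- ) -> int:
--     # O(1): solve coins_needed*b <= coins + (comic_books-b)*coins_offered for the
--     # largest b in [1, comic_books], i.e. b*(coins_needed+coins_offered) <= coins + comic_books*coins_offered.
--     if comic_books <= 0:
--         return comic_books
--     d = coins_needed + coins_offered
--     budget = coins + comic_books * coins_offered
--     if d <= 0:
--         return comic_books if comic_books * d <= budget else 0
--     m = budget // d
--     if m >= comic_books:
--         return comic_books
--     return m if m > 0 else 0
-- ===== Notes on version B (the rewrite author's own statement) =====
-- stated objective: faster
-- what changed: Replaces A's trade-one-book-at-a-time loop with an O(1) closed-form solution of the linear inequality b*(coins_needed+coins_offered) <= coins + comic_books*coins_offered via floor division (with separate handling of the non-positive-slope case).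
import Mathlib
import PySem

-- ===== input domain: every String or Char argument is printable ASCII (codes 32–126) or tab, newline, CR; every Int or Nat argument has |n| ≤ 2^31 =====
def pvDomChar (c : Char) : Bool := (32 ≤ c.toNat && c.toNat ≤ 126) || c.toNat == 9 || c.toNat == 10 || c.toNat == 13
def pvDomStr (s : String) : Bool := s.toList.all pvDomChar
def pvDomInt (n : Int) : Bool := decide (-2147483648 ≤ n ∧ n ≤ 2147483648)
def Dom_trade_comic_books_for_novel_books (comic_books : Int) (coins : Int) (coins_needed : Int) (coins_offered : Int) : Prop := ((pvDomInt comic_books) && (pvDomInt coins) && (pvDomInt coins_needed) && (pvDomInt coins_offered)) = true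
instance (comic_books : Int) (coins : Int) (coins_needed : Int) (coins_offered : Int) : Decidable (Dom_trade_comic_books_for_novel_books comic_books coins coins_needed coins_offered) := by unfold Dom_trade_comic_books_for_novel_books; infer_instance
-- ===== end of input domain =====

-- B replaces A's one-by-one trade loop by an O(1) closed-form solution of the linear inequality (objective: faster).

-- ===== PORT A =====
-- the while loop of A, transliterated as recursion on comic_books
def trade_comic_books_for_novel_books (comic_books : Int) (coins : Int) (coins_needed : Int) (coins_offered : Int) : Int :=
  if _h : comic_books > 0 then
    if coins ≥ coins_needed * comic_books then comic_books
    else trade_comic_books_for_novel_books (comic_books - 1) (coins + coins_offered) coins_needed coins_offered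
  else comic_books
termination_by comic_books.toNat
decreasing_by omega

-- ===== PORT B =====
def trade_comic_books_for_novel_books_alt (comic_books : Int) (coins : Int) (coins_needed : Int) (coins_offered : Int) : Int :=
  if comic_books ≤ 0 then comic_books
  else
    let d := coins_needed + coins_offered
    let budget := coins + comic_books * coins_offered
    if d ≤ 0 then (if comic_books * d ≤ budget then comic_books else 0)
    else
      let m := PySem.Int.floordiv budget d
      if m ≥ comic_books then comic_books
      else if m > 0 then m else 0

-- ===== PRECONDITION & SPEC =====
def Spec_trade_comic_books_for_novel_books (comic_books : Int) (coins : Int) (coins_needed : Int) (coins_offered : Int) (out : Int) : Prop := out = trade_comic_books_for_novel_books_alt comic_books coins coins_needed coins_offered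
instance (comic_books : Int) (coins : Int) (coins_needed : Int) (coins_offered : Int) (out : Int) : Decidable (Spec_trade_comic_books_for_novel_books comic_books coins coins_needed coins_offered out) := by unfold Spec_trade_comic_books_for_novel_books; infer_instance

-- ===== CLAIM (what is proved, stated in full; the proofs are below) =====
def Claim_equal_trade_comic_books_for_novel_books : Prop := ∀ (comic_books : Int) (coins : Int) (coins_needed : Int) (coins_offered : Int), Dom_trade_comic_books_for_novel_books comic_books coins coins_needed coins_offered → Spec_trade_comic_books_for_novel_books comic_books coins coins_needed coins_offered (trade_comic_books_for_novel_books comic_books coins coins_needed coins_offered)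

-- ===== LEMMAS AND PROOFS =====

lemma trade_equiv (k : Nat) : ∀ (n c cn co : Int), n.toNat ≤ k →
    trade_comic_books_for_novel_books n c cn co = trade_comic_books_for_novel_books_alt n c cn co := by
  induction k with
  | zero =>
    intro n c cn co hk
    have hn : n ≤ 0 := by omega
    rw [trade_comic_books_for_novel_books]
    simp [trade_comic_books_for_novel_books_alt, hn, show ¬ n > 0 by omega]
  | succ k ih =>
    intro n c cn co hk
    rw [trade_comic_books_for_novel_books]
    by_cases hn : n > 0
    · simp only [hn, dif_pos]
      by_cases hc : c ≥ cn * n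
      · -- A returns n immediately; show alt also returns n
        simp only [hc, if_pos]
        unfold trade_comic_books_for_novel_books_alt
        simp only [show ¬ n ≤ 0 by omega, if_neg, not_false_iff]
        by_cases hd : cn + co ≤ 0
        · have : n * (cn + co) ≤ c + n * co := by nlinarith
          simp [hd, this]
        · have hdpos : 0 < cn + co := by omega
          have hm : n ≤ PySem.Int.floordiv (c + n * co) (cn + co) := by
            rw [PySem.Int.le_floordiv_iff_mul_le hdpos]; nlinarith
          simp [hd, hm, ge_iff_le]
      · -- A trades one book and recurses
        simp only [hc]
        have hlt : cn * n > c := by omega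
        rw [ih (n - 1) (c + co) cn co (by omega)]
        unfold trade_comic_books_for_novel_books_alt
        by_cases hd : cn + co ≤ 0
        · -- condition fails at n, and for d ≤ 0 it fails for every smaller count too
          have hna : ¬ (n * (cn + co) ≤ c + n * co) := by nlinarith
          by_cases h1 : n - 1 ≤ 0
          · simp [h1, show ¬ n ≤ 0 by omega, hd, hna]; omega
          · have hnb : ¬ ((n - 1) * (cn + co) ≤ c + n * co) := by nlinarith
            have heq : (c + co) + (n - 1) * co = c + n * co := by ring
            simp [h1, show ¬ n ≤ 0 by omega, hd, hna, heq, hnb]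
        · have hdpos : 0 < cn + co := by omega
          have hbud : (c + co) + (n - 1) * co = c + n * co := by ring
          set m := PySem.Int.floordiv (c + n * co) (cn + co) with hmdef
          have hmlt : m < n := by
            rw [hmdef, PySem.Int.floordiv_lt_iff_lt_mul hdpos]; nlinarith
          by_cases h1 : n - 1 ≤ 0
          · -- n = 1, so m ≤ 0: both sides give 0
            have hm0 : ¬ m > 0 := by omega
            simp [h1, show ¬ n ≤ 0 by omega, hd]
            omega
          · simp only [h1, if_neg, show ¬ n ≤ 0 by omega, not_false_iff, hd, hbud,
              ← hmdef, show ¬ m ≥ n by omega]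
            split_ifs <;> omega
    · simp only [hn, dif_neg, not_false_iff]
      simp [trade_comic_books_for_novel_books_alt, show n ≤ 0 by omega]

-- ===== VERDICT (by name: the statement is the Claim_ definition above) =====
theorem trade_comic_books_for_novel_books_spec : Claim_equal_trade_comic_books_for_novel_books := by
  intro n c cn co _
  exact trade_equiv n.toNat n c cn co le_rfl
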